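-- pv_equiv track=rewrite | github.com/goodplay/goodplay | tests/helpers/goodplay_helpers.py | smart_content_iter
-- ===== SOURCE A (Python) =====
-- def smart_content_iter(smart_content, path_prefix):
--     rel_path = None
--     content = []
--
--     for line in smart_content.splitlines():
--         if line.startswith(path_prefix):
--             if rel_path:
--                 yield rel_path, '\n'.join(content)
--             rel_path = line[len(path_prefix):]
--             content = []
--         else:
--             content.append(line)
--
--     if rel_path:
--         yield rel_path, '\n'.join(content)
-- ===== SOURCE B (Python) =====
-- def smart_content_iter(smart_content, path_prefix):
--     # Boundary-scan decomposition: skip the preamble, then for each marker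
--     # find the next marker index and slice the body out, instead of A's
--     # accumulate-and-flush state machine.
--     lines = smart_content.splitlines()
--     n = len(path_prefix)
--     i = 0
--     while i < len(lines) and not lines[i].startswith(path_prefix):
--         i += 1
--     while i < len(lines):
--         k = i + 1
--         while k < len(lines) and not lines[k].startswith(path_prefix):
--             k += 1
--         rel_path = lines[i][n:]
--         if rel_path:
--             yield rel_path, '\n'.join(lines[i + 1:k])
--         i = k
-- ===== Notes on version B (the rewrite author's own statement) =====
-- stated objective: alternative
-- what changed: Replaces A's single accumulate-and-flush state machine (current rel_path + growing content buffer) with a staged boundary scan: skip the preamble, then repeatedly find the next marker index and slice the section body out between consecutive markers.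
import Mathlib
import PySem

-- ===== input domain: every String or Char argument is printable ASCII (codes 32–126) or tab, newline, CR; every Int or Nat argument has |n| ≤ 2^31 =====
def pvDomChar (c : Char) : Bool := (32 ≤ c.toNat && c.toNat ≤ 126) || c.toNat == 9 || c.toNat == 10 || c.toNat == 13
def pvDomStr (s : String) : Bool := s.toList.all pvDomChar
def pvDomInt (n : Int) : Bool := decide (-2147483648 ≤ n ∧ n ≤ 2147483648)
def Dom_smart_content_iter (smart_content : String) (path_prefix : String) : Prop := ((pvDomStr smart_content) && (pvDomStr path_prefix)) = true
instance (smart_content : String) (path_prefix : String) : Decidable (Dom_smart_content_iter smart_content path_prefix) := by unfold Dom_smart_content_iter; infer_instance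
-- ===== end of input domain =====

-- B replaces A's accumulate-and-flush state machine with a staged boundary scan
-- (skip preamble, then slice each section between consecutive marker lines); same
-- O(n) cost, different decomposition. Both generators are compared as lists.

-- ===== PORT A =====
-- 'yield rel_path, "\n".join(content)' when rel_path is truthy (non-None, non-empty)
def pvEmitA (rel : Option String) (content : List String) : List (String × String) :=
  match rel with
  | some r => if r ≠ "" then [(r, PySem.Str.join "\n" content)] else []
  | none => []

-- one iteration of A's for-loop; state = (yielded so far, rel_path, content)
def pvStepA (path_prefix : String)
    (st : List (String × String) × Option String × List String) (line : String) :
    List (String × String) × Option String × List String :=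
  if PySem.Str.startswith line path_prefix then
    (st.1 ++ pvEmitA st.2.1 st.2.2,
     some (PySem.Str.slice line (some (PySem.Str.len path_prefix)) none),
     [])
  else
    (st.1, st.2.1, st.2.2 ++ [line])

def smart_content_iter (smart_content : String) (path_prefix : String) : List (String × String) :=
  let st := (PySem.Str.splitlines smart_content).foldl (pvStepA path_prefix)
      (([] : List (String × String)), (none : Option String), ([] : List String))
  st.1 ++ pvEmitA st.2.1 st.2.2

-- ===== PORT B =====
-- inner while loop of Source B: body = lines[i+1:k], rest = lines[k:] where k is the
-- next marker index — i.e. takeWhile/dropWhile of the non-marker predicate on the tail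
def pvGoB (path_prefix : String) (lines : List String) : List (String × String) :=
  match lines with
  | [] => []
  | l :: t =>
    let body := t.takeWhile (fun s => !PySem.Str.startswith s path_prefix)
    let rest := t.dropWhile (fun s => !PySem.Str.startswith s path_prefix)
    let rel := PySem.Str.slice l (some (PySem.Str.len path_prefix)) none
    (if rel ≠ "" then [(rel, PySem.Str.join "\n" body)] else []) ++ pvGoB path_prefix rest
termination_by lines.length
decreasing_by
  simp only [List.length_cons]
  exact Nat.lt_succ_of_le (List.length_dropWhile_le _ _)

def smart_content_iter_alt (smart_content : String) (path_prefix : String) : List (String × String) :=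
  -- first while loop of Source B skips the preamble (dropWhile), then the outer loop = pvGoB
  pvGoB path_prefix
    ((PySem.Str.splitlines smart_content).dropWhile (fun s => !PySem.Str.startswith s path_prefix))

-- ===== PRECONDITION & SPEC =====
def Spec_smart_content_iter (smart_content : String) (path_prefix : String) (out : List (String × String)) : Prop := out = smart_content_iter_alt smart_content path_prefix
instance (smart_content : String) (path_prefix : String) (out : List (String × String)) : Decidable (Spec_smart_content_iter smart_content path_prefix out) := by unfold Spec_smart_content_iter; infer_instance

-- ===== CLAIM (what is proved, stated in full; the proofs are below) =====
def Claim_equal_smart_content_iter : Prop := ∀ (smart_content : String) (path_prefix : String), Dom_smart_content_iter smart_content path_prefix → Spec_smart_content_iter smart_content path_prefix (smart_content_iter smart_content path_prefix)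

-- ===== LEMMAS AND PROOFS =====

lemma pvGoB_nil (pp : String) : pvGoB pp [] = [] := by
  rw [pvGoB]

lemma pvGoB_cons (pp l : String) (t : List String) :
    pvGoB pp (l :: t) =
      (if PySem.Str.slice l (some (PySem.Str.len pp)) none ≠ "" then
        [(PySem.Str.slice l (some (PySem.Str.len pp)) none,
          PySem.Str.join "\n" (t.takeWhile (fun s => !PySem.Str.startswith s pp)))]
      else []) ++ pvGoB pp (t.dropWhile (fun s => !PySem.Str.startswith s pp)) := by
  rw [pvGoB]

-- the loop invariant: flushing A's fold state equals the already-yielded part,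
-- the pending section completed by the next non-marker stretch, then B's scan of the rest
lemma pvFoldA_eq (pp : String) (ls : List String)
    (acc : List (String × String)) (rel : Option String) (cont : List String) :
    (let st := ls.foldl (pvStepA pp) (acc, rel, cont); st.1 ++ pvEmitA st.2.1 st.2.2)
      = acc ++ pvEmitA rel (cont ++ ls.takeWhile (fun s => !PySem.Str.startswith s pp))
          ++ pvGoB pp (ls.dropWhile (fun s => !PySem.Str.startswith s pp)) := by
  induction ls generalizing acc rel cont with
  | nil => simp [pvGoB_nil]
  | cons l t ih =>
    by_cases hl : PySem.Str.startswith l pp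
    · simp only [List.foldl_cons, pvStepA, hl, if_pos, List.takeWhile_cons, List.dropWhile_cons,
        Bool.not_true, Bool.false_eq_true, if_false, ih]
      rw [pvGoB_cons]
      simp [pvEmitA, List.append_assoc]
    · simp only [List.foldl_cons, pvStepA, hl, List.takeWhile_cons, List.dropWhile_cons,
        Bool.not_eq_true' ] at *
      simp only [if_true, if_false, Bool.false_eq_true]
      rw [ih]
      simp [List.append_assoc]

-- ===== VERDICT (by name: the statement is the Claim_ definition above) =====
theorem smart_content_iter_spec : Claim_equal_smart_content_iter := by
  intro sc pp _
  show smart_content_iter sc pp = smart_content_iter_alt sc pp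
  unfold smart_content_iter smart_content_iter_alt
  rw [pvFoldA_eq]
  simp [pvEmitA]
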